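-- pv_equiv track=rewrite | github.com/Daniel89081/portfolio | translate_all.py | update_body_links
-- ===== SOURCE A (Python) =====
-- def update_body_links(html):
--     """Replace internal body links with /de/ prefixed versions."""
--     body_start = html.find('<body>')
--     if body_start == -1:
--         body_start = 0
--     head = html[:body_start]
--     body = html[body_start:]
--
--     # Order matters: most specific first
--     link_maps = [
--         ('href="/legal/privacy/"', 'href="/de/legal/privacy/"'),
--         ('href="/legal/terms/"', 'href="/de/legal/terms/"'),
--         ('href="/legal/privacy"', 'href="/de/legal/privacy/"'),
--         ('href="/legal/terms"', 'href="/de/legal/terms/"'),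
--         ('href="/projects/resumeme/"', 'href="/de/projects/resumeme/"'),
--         ('href="/projects/resumeme"', 'href="/de/projects/resumeme/"'),
--         ('href="/projects/tharos-discord-bot/"', 'href="/de/projects/tharos-discord-bot/"'),
--         ('href="/projects/tharos-discord-bot"', 'href="/de/projects/tharos-discord-bot/"'),
--         ('href="/projects/freeai-discord-bot/"', 'href="/de/projects/freeai-discord-bot/"'),
--         ('href="/projects/freeai-discord-bot"', 'href="/de/projects/freeai-discord-bot/"'),
--         ('href="/projects/shoply-landing-page/"', 'href="/de/projects/shoply-landing-page/"'),
--         ('href="/projects/shoply-landing-page"', 'href="/de/projects/shoply-landing-page/"'),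
--         ('href="/projects/shoply-app/"', 'href="/de/projects/shoply-app/"'),
--         ('href="/projects/shoply-app"', 'href="/de/projects/shoply-app/"'),
--         ('href="/projects/studyapp/"', 'href="/de/projects/studyapp/"'),
--         ('href="/projects/studyapp"', 'href="/de/projects/studyapp/"'),
--         ('href="/projects/"', 'href="/de/projects/"'),
--         ('href="/projects"', 'href="/de/projects/"'),
--         ('href="/work/"', 'href="/de/work/"'),
--         ('href="/work"', 'href="/de/work/"'),
--     ]
--     for old, new in link_maps:
--         body = body.replace(old, new)
--
--     return head + body
-- ===== SOURCE B (Python) =====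
-- def update_body_links(html):
--     """Replace internal body links with /de/ prefixed versions."""
--     i = html.find('<body>')
--     if i == -1:
--         i = 0
--     body = html[i:]
--     # table sorted longest key first, so the single scan always takes the
--     # most specific match; keys are mutually non-overlapping href="..." literals
--     table = [
--         ('href="/projects/shoply-landing-page/"', 'href="/de/projects/shoply-landing-page/"'),
--         ('href="/projects/tharos-discord-bot/"', 'href="/de/projects/tharos-discord-bot/"'),
--         ('href="/projects/freeai-discord-bot/"', 'href="/de/projects/freeai-discord-bot/"'),
--         ('href="/projects/shoply-landing-page"', 'href="/de/projects/shoply-landing-page/"'),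
--         ('href="/projects/tharos-discord-bot"', 'href="/de/projects/tharos-discord-bot/"'),
--         ('href="/projects/freeai-discord-bot"', 'href="/de/projects/freeai-discord-bot/"'),
--         ('href="/projects/resumeme/"', 'href="/de/projects/resumeme/"'),
--         ('href="/projects/studyapp/"', 'href="/de/projects/studyapp/"'),
--         ('href="/projects/shoply-app/"', 'href="/de/projects/shoply-app/"'),
--         ('href="/projects/resumeme"', 'href="/de/projects/resumeme/"'),
--         ('href="/projects/studyapp"', 'href="/de/projects/studyapp/"'),
--         ('href="/projects/shoply-app"', 'href="/de/projects/shoply-app/"'),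
--         ('href="/legal/privacy/"', 'href="/de/legal/privacy/"'),
--         ('href="/legal/privacy"', 'href="/de/legal/privacy/"'),
--         ('href="/legal/terms/"', 'href="/de/legal/terms/"'),
--         ('href="/legal/terms"', 'href="/de/legal/terms/"'),
--         ('href="/projects/"', 'href="/de/projects/"'),
--         ('href="/projects"', 'href="/de/projects/"'),
--         ('href="/work/"', 'href="/de/work/"'),
--         ('href="/work"', 'href="/de/work/"'),
--     ]
--     out = [html[:i]]
--     j = 0
--     n = len(body)
--     while j < n:
--         for old, new in table:
--             if body.startswith(old, j):
--                 out.append(new)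
--                 j += len(old)
--                 break
--         else:
--             out.append(body[j])
--             j += 1
--     return ''.join(out)
-- ===== Notes on version B (the rewrite author's own statement) =====
-- stated objective: alternative
-- what changed: A runs 20 sequential full-string str.replace passes over the body; B builds one longest-key-first table of the 20 link mappings and rewrites the body in a single left-to-right scan, taking the unique matching key at each position.
import Mathlib
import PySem

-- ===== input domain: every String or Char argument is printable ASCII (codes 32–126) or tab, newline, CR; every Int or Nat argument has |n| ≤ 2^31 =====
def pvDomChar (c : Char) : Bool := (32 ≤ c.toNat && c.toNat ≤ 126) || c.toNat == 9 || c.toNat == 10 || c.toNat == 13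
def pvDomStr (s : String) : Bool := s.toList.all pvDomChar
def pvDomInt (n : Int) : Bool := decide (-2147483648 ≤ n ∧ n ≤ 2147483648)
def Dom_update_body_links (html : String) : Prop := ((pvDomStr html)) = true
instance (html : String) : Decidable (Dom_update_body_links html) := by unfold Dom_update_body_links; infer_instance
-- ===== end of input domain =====

-- B replaces A's 20 sequential full-string .replace passes over the body by ONE left-to-right
-- table-driven scan (longest-key-first table); same return value, different algorithm.

-- ===== PORT A =====
-- the 20 (old, new) pairs, in A's order
def pvPairsA : List (String × String) := [
  ("href=\"/legal/privacy/\"", "href=\"/de/legal/privacy/\""),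
  ("href=\"/legal/terms/\"", "href=\"/de/legal/terms/\""),
  ("href=\"/legal/privacy\"", "href=\"/de/legal/privacy/\""),
  ("href=\"/legal/terms\"", "href=\"/de/legal/terms/\""),
  ("href=\"/projects/resumeme/\"", "href=\"/de/projects/resumeme/\""),
  ("href=\"/projects/resumeme\"", "href=\"/de/projects/resumeme/\""),
  ("href=\"/projects/tharos-discord-bot/\"", "href=\"/de/projects/tharos-discord-bot/\""),
  ("href=\"/projects/tharos-discord-bot\"", "href=\"/de/projects/tharos-discord-bot/\""),
  ("href=\"/projects/freeai-discord-bot/\"", "href=\"/de/projects/freeai-discord-bot/\""),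
  ("href=\"/projects/freeai-discord-bot\"", "href=\"/de/projects/freeai-discord-bot/\""),
  ("href=\"/projects/shoply-landing-page/\"", "href=\"/de/projects/shoply-landing-page/\""),
  ("href=\"/projects/shoply-landing-page\"", "href=\"/de/projects/shoply-landing-page/\""),
  ("href=\"/projects/shoply-app/\"", "href=\"/de/projects/shoply-app/\""),
  ("href=\"/projects/shoply-app\"", "href=\"/de/projects/shoply-app/\""),
  ("href=\"/projects/studyapp/\"", "href=\"/de/projects/studyapp/\""),
  ("href=\"/projects/studyapp\"", "href=\"/de/projects/studyapp/\""),
  ("href=\"/projects/\"", "href=\"/de/projects/\""),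
  ("href=\"/projects\"", "href=\"/de/projects/\""),
  ("href=\"/work/\"", "href=\"/de/work/\""),
  ("href=\"/work\"", "href=\"/de/work/\"")
]

def update_body_links (html : String) : String :=
  let bodyStart0 : Int := PySem.Str.find html "<body>"
  let bodyStart : Int := if bodyStart0 = -1 then 0 else bodyStart0
  let head : String := PySem.Str.slice html none (some bodyStart)
  let body : String := PySem.Str.slice html (some bodyStart) none
  let body2 : String := pvPairsA.foldl (fun b pr => PySem.Str.replace b pr.1 pr.2) body
  head ++ body2

-- ===== PORT B =====
-- Source B's table, longest key first (literal order from Source B), as char lists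
def pvTableB : List (List Char × List Char) := [
  (("href=\"/projects/shoply-landing-page/\"" : String).toList, ("href=\"/de/projects/shoply-landing-page/\"" : String).toList),
  (("href=\"/projects/tharos-discord-bot/\"" : String).toList, ("href=\"/de/projects/tharos-discord-bot/\"" : String).toList),
  (("href=\"/projects/freeai-discord-bot/\"" : String).toList, ("href=\"/de/projects/freeai-discord-bot/\"" : String).toList),
  (("href=\"/projects/shoply-landing-page\"" : String).toList, ("href=\"/de/projects/shoply-landing-page/\"" : String).toList),
  (("href=\"/projects/tharos-discord-bot\"" : String).toList, ("href=\"/de/projects/tharos-discord-bot/\"" : String).toList),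
  (("href=\"/projects/freeai-discord-bot\"" : String).toList, ("href=\"/de/projects/freeai-discord-bot/\"" : String).toList),
  (("href=\"/projects/resumeme/\"" : String).toList, ("href=\"/de/projects/resumeme/\"" : String).toList),
  (("href=\"/projects/studyapp/\"" : String).toList, ("href=\"/de/projects/studyapp/\"" : String).toList),
  (("href=\"/projects/shoply-app/\"" : String).toList, ("href=\"/de/projects/shoply-app/\"" : String).toList),
  (("href=\"/projects/resumeme\"" : String).toList, ("href=\"/de/projects/resumeme/\"" : String).toList),
  (("href=\"/projects/studyapp\"" : String).toList, ("href=\"/de/projects/studyapp/\"" : String).toList),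
  (("href=\"/projects/shoply-app\"" : String).toList, ("href=\"/de/projects/shoply-app/\"" : String).toList),
  (("href=\"/legal/privacy/\"" : String).toList, ("href=\"/de/legal/privacy/\"" : String).toList),
  (("href=\"/legal/privacy\"" : String).toList, ("href=\"/de/legal/privacy/\"" : String).toList),
  (("href=\"/legal/terms/\"" : String).toList, ("href=\"/de/legal/terms/\"" : String).toList),
  (("href=\"/legal/terms\"" : String).toList, ("href=\"/de/legal/terms/\"" : String).toList),
  (("href=\"/projects/\"" : String).toList, ("href=\"/de/projects/\"" : String).toList),
  (("href=\"/projects\"" : String).toList, ("href=\"/de/projects/\"" : String).toList),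
  (("href=\"/work/\"" : String).toList, ("href=\"/de/work/\"" : String).toList),
  (("href=\"/work\"" : String).toList, ("href=\"/de/work/\"" : String).toList)
]

-- Source B's single scan: at each position take the first (hence longest) matching key of the
-- table, emit its value and jump past the match; otherwise copy one character
-- (Source B's index loop rendered as structural recursion over the same left-to-right traversal;
--  body.startswith(old, j) is the isPrefixOf test at the current position, ''.join is ++)
def pvScan (table : List (List Char × List Char)) : List Char → List Char
  | [] => []
  | c :: t =>
    match table.find? (fun pr => pr.1.isPrefixOf (c :: t)) with
    | some pr => pr.2 ++ pvScan table (t.drop (pr.1.length - 1))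
    | none => c :: pvScan table t
termination_by l => l.length
decreasing_by
  all_goals simp

def update_body_links_alt (html : String) : String :=
  let bodyStart0 : Int := PySem.Str.find html "<body>"
  let bodyStart : Int := if bodyStart0 = -1 then 0 else bodyStart0
  let head : String := PySem.Str.slice html none (some bodyStart)
  let body : String := PySem.Str.slice html (some bodyStart) none
  head ++ String.ofList (pvScan pvTableB body.toList)

-- ===== PRECONDITION & SPEC =====
def Spec_update_body_links (html : String) (out : String) : Prop := out = update_body_links_alt html
instance (html : String) (out : String) : Decidable (Spec_update_body_links html out) := by unfold Spec_update_body_links; infer_instance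

-- ===== CLAIM (what is proved, stated in full; the proofs are below) =====
def Claim_equal_update_body_links : Prop := ∀ (html : String), Dom_update_body_links html → Spec_update_body_links html (update_body_links html)

-- ===== LEMMAS AND PROOFS =====

-- Python str.replace (nonempty pattern) as a plain structural recursion
def pvSubst (p n : List Char) : List Char → List Char
  | [] => []
  | c :: t =>
    if p.isPrefixOf (c :: t) then n ++ pvSubst p n (t.drop (p.length - 1)) else c :: pvSubst p n t
termination_by l => l.length
decreasing_by
  all_goals simp

-- A's chain of replaces, on char lists
def pvChain (ps : List (List Char × List Char)) (l : List Char) : List Char :=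
  ps.foldl (fun b pr => pvSubst pr.1 pr.2 b) l

-- A's pairs as char lists
def pvPL : List (List Char × List Char) := pvPairsA.map (fun pr => (pr.1.toList, pr.2.toList))

-- the same pairs as Nat lists (cheap kernel computation for the decided facts below)
def pvPLN : List (List Nat × List Nat) := pvPL.map (fun pr => (pr.1.map Char.toNat, pr.2.map Char.toNat))

-- "x and y disagree inside their overlap": neither is a prefix of the other
def pvGood (x y : List Char) : Prop := ¬ x <+: y ∧ ¬ y <+: x

def pvGoodBN (x y : List Nat) : Bool := !(x.isPrefixOf y || y.isPrefixOf x)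
-- quick screen on the first two elements, full check as fallback
def pvGoodB2N (x y : List Nat) : Bool := pvGoodBN (x.take 2) (y.take 2) || pvGoodBN x y

def pvTailOKN (L : List (List Nat × List Nat)) (tail : List Nat) : Bool :=
  L.all (fun p => pvGoodB2N tail p.1 && pvGoodB2N tail p.2)

def pvAllSuffOKN (L : List (List Nat × List Nat)) : List Nat → Bool
  | [] => true
  | _ :: t => (t.isEmpty || pvTailOKN L t) && pvAllSuffOKN L t

-- the non-interference facts about the 20 pairs, as one boolean check:
-- keys nonempty; distinct keys disagree in their overlap; keys determine values;
-- every replacement disagrees with every key; every proper tail of a key or of a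
-- replacement disagrees with every key and every replacement
def pvFactsBN (L : List (List Nat × List Nat)) : Bool :=
  L.all (fun q => !q.1.isEmpty &&
    L.all (fun p => (decide (p.1 = q.1) || pvGoodBN p.1 q.1) &&
                    (decide (p.1 ≠ q.1) || decide (p.2 = q.2)) &&
                    pvGoodBN q.2 p.1) &&
    pvAllSuffOKN L q.1 && pvAllSuffOKN L q.2)

set_option maxHeartbeats 4000000 in
theorem pvFactsN : pvFactsBN pvPLN = true := by decide

theorem pvTB_sub : ∀ pr ∈ pvTableB, pr ∈ pvPL := by decide
theorem pvPL_sub : ∀ pr ∈ pvPL, pr ∈ pvTableB := by decide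

-- ---- transfer of the decided Nat-level facts to Char-level pvGood facts ----

theorem pvMapInj : ∀ x y : List Char, x.map Char.toNat = y.map Char.toNat → x = y := by
  intro x
  induction x with
  | nil => intro y h; cases y <;> simp_all
  | cons a t ih =>
    intro y h
    cases y with
    | nil => simp_all
    | cons b u =>
      simp only [List.map_cons, List.cons.injEq] at h
      have hab : a = b := by
        have := Char.ofNat_toNat a
        rw [← this, h.1, Char.ofNat_toNat]
      exact by rw [hab, ih u h.2]

theorem pvGoodN_transfer {x y : List Char}
    (h : pvGoodBN (x.map Char.toNat) (y.map Char.toNat) = true) : pvGood x y := by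
  simp only [pvGoodBN, Bool.not_eq_eq_eq_not, Bool.not_true, Bool.or_eq_false_iff] at h
  constructor
  · intro hp
    have := List.IsPrefix.map Char.toNat hp
    rw [← List.isPrefixOf_iff_prefix] at this
    simp [this] at h
  · intro hp
    have := List.IsPrefix.map Char.toNat hp
    rw [← List.isPrefixOf_iff_prefix] at this
    simp [this] at h

theorem pvGood2N_transfer {x y : List Char}
    (h : pvGoodB2N (x.map Char.toNat) (y.map Char.toNat) = true) : pvGood x y := by
  rcases Bool.or_eq_true _ _ |>.mp h with h2 | hf
  · rw [← List.map_take, ← List.map_take] at h2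
    have hg : pvGood (x.take 2) (y.take 2) := pvGoodN_transfer h2
    exact ⟨fun hp => hg.1 (List.IsPrefix.take hp 2), fun hp => hg.2 (List.IsPrefix.take hp 2)⟩
  · exact pvGoodN_transfer hf

theorem pvGood_symm {x y : List Char} (h : pvGood x y) : pvGood y x := ⟨h.2, h.1⟩

-- unpack pvFactsN into its Prop-level pieces, still at the Nat level
theorem pvFactsN_unpacked : ∀ qN ∈ pvPLN, qN.1 ≠ [] ∧
    (∀ pN ∈ pvPLN, (pN.1 = qN.1 ∨ pvGoodBN pN.1 qN.1 = true) ∧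
                   (pN.1 = qN.1 → pN.2 = qN.2) ∧
                   pvGoodBN qN.2 pN.1 = true) ∧
    pvAllSuffOKN pvPLN qN.1 = true ∧ pvAllSuffOKN pvPLN qN.2 = true := by
  have h := pvFactsN
  simp only [pvFactsBN, List.all_eq_true, Bool.and_eq_true, Bool.or_eq_true,
    decide_eq_true_eq, Bool.not_eq_eq_eq_not, Bool.not_true, List.isEmpty_eq_false_iff] at h
  intro qN hq
  obtain ⟨⟨⟨h1, h2⟩, h3⟩, h4⟩ := h qN hq
  refine ⟨h1, fun pN hp => ?_, h3, h4⟩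
  obtain ⟨⟨ha, hb⟩, hc⟩ := h2 pN hp
  exact ⟨ha, fun he => hb.resolve_left (not_not.mpr he), hc⟩

theorem pvMemN {q : List Char × List Char} (hq : q ∈ pvPL) :
    (q.1.map Char.toNat, q.2.map Char.toNat) ∈ pvPLN := by
  exact List.mem_map_of_mem hq

theorem pvFact_nonempty : ∀ q ∈ pvPL, q.1 ≠ [] := by
  intro q hq
  have := (pvFactsN_unpacked _ (pvMemN hq)).1
  intro hnil; rw [hnil] at this; simp at this

theorem pvKeyInj : ∀ a ∈ pvPL, ∀ b ∈ pvPL, a.1 = b.1 → a = b := by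
  intro a ha b hb he
  have h := ((pvFactsN_unpacked _ (pvMemN hb)).2.1 _ (pvMemN ha)).2.1
  have h2 : a.2 = b.2 := pvMapInj _ _ (h (by rw [he]))
  exact Prod.ext he h2

theorem pvFact_uniq : ∀ p ∈ pvPL, ∀ q ∈ pvPL, p.1 ≠ q.1 → pvGood p.1 q.1 := by
  intro p hp q hq hne
  have h := ((pvFactsN_unpacked _ (pvMemN hq)).2.1 _ (pvMemN hp)).1
  rcases h with h | h
  · exact absurd (pvMapInj _ _ h) hne
  · exact pvGoodN_transfer h

-- every replacement disagrees with every key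
theorem pvFact_rep0 : ∀ q ∈ pvPL, ∀ p ∈ pvPL, pvGood q.2 p.1 := by
  intro q hq p hp
  exact pvGoodN_transfer ((pvFactsN_unpacked _ (pvMemN hq)).2.1 _ (pvMemN hp)).2.2

theorem pvAllSuffOK_drop (L : List (List Nat × List Nat)) :
    ∀ s : List Nat, pvAllSuffOKN L s = true →
      ∀ d, 0 < d → d < s.length → pvTailOKN L (s.drop d) = true := by
  intro s
  induction s with
  | nil => intro _ d _ hd; simp at hd
  | cons c t ih =>
    intro h d hd hlen
    simp only [pvAllSuffOKN, Bool.and_eq_true, Bool.or_eq_true] at h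
    obtain ⟨h1, h2⟩ := h
    obtain ⟨k, rfl⟩ : ∃ k, d = k + 1 := ⟨d - 1, by omega⟩
    rw [List.drop_succ_cons]
    rcases Nat.eq_zero_or_pos k with rfl | hk
    · simp only [List.drop_zero]
      rcases h1 with h1 | h1
      · simp only [List.length_cons] at hlen
        have : t ≠ [] := by intro he; rw [he] at hlen; simp at hlen
        rw [List.isEmpty_iff] at h1; exact absurd h1 this
      · exact h1
    · exact ih h2 k hk (by simp at hlen; omega)

-- every proper tail of a key disagrees with every key and with every replacement
theorem pvFact_tailPat : ∀ q ∈ pvPL, ∀ p ∈ pvPL, ∀ d, 0 < d → d < q.1.length →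
    pvGood (q.1.drop d) p.1 ∧ pvGood (q.1.drop d) p.2 := by
  intro q hq p hp d hd hlen
  have hs := (pvFactsN_unpacked _ (pvMemN hq)).2.2.1
  have ht := pvAllSuffOK_drop _ _ hs d hd (by rw [List.length_map]; exact hlen)
  simp only [pvTailOKN, List.all_eq_true, Bool.and_eq_true] at ht
  obtain ⟨ha, hb⟩ := ht _ (pvMemN hp)
  rw [← List.map_drop] at ha hb
  exact ⟨pvGood2N_transfer ha, pvGood2N_transfer hb⟩

-- every proper tail of a replacement disagrees with every key
theorem pvFact_tailRep : ∀ q ∈ pvPL, ∀ p ∈ pvPL, ∀ d, 0 < d → d < q.2.length →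
    pvGood (q.2.drop d) p.1 := by
  intro q hq p hp d hd hlen
  have hs := (pvFactsN_unpacked _ (pvMemN hq)).2.2.2
  have ht := pvAllSuffOK_drop _ _ hs d hd (by rw [List.length_map]; exact hlen)
  simp only [pvTailOKN, List.all_eq_true, Bool.and_eq_true] at ht
  obtain ⟨ha, _⟩ := ht _ (pvMemN hp)
  rw [← List.map_drop] at ha
  exact pvGood2N_transfer ha

-- ---- equation lemmas for pvSubst and pvScan ----

theorem pvSubst_nil (p n : List Char) : pvSubst p n [] = [] := by simp [pvSubst]

theorem pvSubst_pos {p : List Char} (n : List Char) {l : List Char} (hp : p ≠ []) (h : p <+: l) :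
    pvSubst p n l = n ++ pvSubst p n (l.drop p.length) := by
  cases l with
  | nil => rw [List.prefix_nil] at h; exact absurd h hp
  | cons c t =>
    rw [pvSubst]
    rw [← List.isPrefixOf_iff_prefix] at h
    rw [if_pos h]
    have hlen : p.length - 1 + 1 = p.length := by
      cases p with
      | nil => exact absurd rfl hp
      | cons a b => simp
    rw [← hlen, List.drop_succ_cons, hlen]

theorem pvSubst_neg {p : List Char} (n : List Char) {c : Char} {t : List Char}
    (h : ¬ p <+: (c :: t)) : pvSubst p n (c :: t) = c :: pvSubst p n t := by
  rw [pvSubst, if_neg (by rw [List.isPrefixOf_iff_prefix]; exact h)]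

theorem pvScan_nil (T : List (List Char × List Char)) : pvScan T [] = [] := by simp [pvScan]

theorem pvScan_some {T : List (List Char × List Char)} {l : List Char}
    {pr : List Char × List Char} (hpr : pr.1 ≠ [])
    (hl : l ≠ []) (h : T.find? (fun e => e.1.isPrefixOf l) = some pr) :
    pvScan T l = pr.2 ++ pvScan T (l.drop pr.1.length) := by
  cases l with
  | nil => exact absurd rfl hl
  | cons c t =>
    rw [pvScan, h]
    have hlen : pr.1.length - 1 + 1 = pr.1.length := by
      cases hc : pr.1 with
      | nil => exact absurd hc hpr
      | cons a b => simp
    show pr.2 ++ pvScan T (t.drop (pr.1.length - 1)) = _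
    rw [← hlen, List.drop_succ_cons, hlen]

theorem pvScan_cons_none {T : List (List Char × List Char)} {c : Char} {t : List Char}
    (h : T.find? (fun e => e.1.isPrefixOf (c :: t)) = none) :
    pvScan T (c :: t) = c :: pvScan T t := by
  rw [pvScan, h]

-- ---- find? helpers ----

theorem pvFind_some {T : List (List Char × List Char)} {l : List Char}
    {pr : List Char × List Char} (hmem : pr ∈ T) (hp : pr.1 <+: l)
    (huniq : ∀ pr' ∈ T, pr'.1 <+: l → pr' = pr) :
    T.find? (fun e => e.1.isPrefixOf l) = some pr := by
  induction T with
  | nil => simp at hmem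
  | cons e rest ih =>
    by_cases he : e.1 <+: l
    · have : e = pr := huniq e (List.mem_cons_self) he
      subst this
      exact List.find?_cons_of_pos (by rw [List.isPrefixOf_iff_prefix]; exact he)
    · rw [List.find?_cons_of_neg (by rw [List.isPrefixOf_iff_prefix]; exact he)]
      rcases List.mem_cons.mp hmem with rfl | hmem'
      · exact absurd hp he
      · exact ih hmem' (fun pr' h1 h2 => huniq pr' (List.mem_cons_of_mem _ h1) h2)

theorem pvFind_none {T : List (List Char × List Char)} {l : List Char}
    (h : ∀ pr ∈ T, ¬ pr.1 <+: l) :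
    T.find? (fun e => e.1.isPrefixOf l) = none := by
  rw [List.find?_eq_none]
  intro x hx
  rw [List.isPrefixOf_iff_prefix]
  exact h x hx

-- ---- prefix combinatorics ----

theorem pvPrefix_append_cases {u a b : List Char} (h : u <+: a ++ b) : u <+: a ∨ a <+: u :=
  List.prefix_or_prefix_of_prefix h (List.prefix_append a b)

theorem pvGood_not_both_prefix {x y l : List Char} (g : pvGood x y)
    (hx : x <+: l) (hy : y <+: l) : False := by
  rcases List.prefix_or_prefix_of_prefix hx hy with h | h
  · exact g.1 h
  · exact g.2 h

theorem pvGood_not_prefix_append {x y b : List Char} (g : pvGood x y) (h : x <+: y ++ b) : False := by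
  rcases pvPrefix_append_cases h with h | h
  · exact g.1 h
  · exact g.2 h

theorem pvDrop_succ_of_cons {q u : List Char} {c : Char} {d : Nat} (h : q.drop d = c :: u) :
    q.drop (d + 1) = u := by
  have h2 : q.drop (d + 1) = (q.drop d).drop 1 := by rw [List.drop_drop]
  rw [h2, h]; rfl

theorem pvDrop_lt_of_cons {q u : List Char} {c : Char} {d : Nat} (h : q.drop d = c :: u) :
    d < q.length := by
  by_contra hle
  rw [List.drop_eq_nil_of_le (by omega)] at h
  exact List.cons_ne_nil c u h.symm

-- pvSubst does not create a match of a pattern where there was none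
theorem pvSubst_prefix_transfer (p n q0 : List Char) (hp : p ≠ [])
    (hq0n : ∀ d, d < q0.length → pvGood (q0.drop d) n) :
    ∀ l d, q0.drop d <+: pvSubst p n l → q0.drop d <+: l := by
  intro l
  induction l with
  | nil => intro d h; rw [pvSubst_nil, List.prefix_nil] at h; rw [h]
  | cons c t ih =>
    intro d h
    by_cases hpf : p <+: (c :: t)
    · rw [pvSubst_pos n hp hpf] at h
      rcases hu : q0.drop d with _ | ⟨u0, urest⟩
      · exact List.nil_prefix
      · exfalso
        rw [hu] at h
        have hd : d < q0.length := pvDrop_lt_of_cons hu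
        have g := hq0n d hd
        rw [hu] at g
        exact pvGood_not_prefix_append g h
    · rw [pvSubst_neg n hpf] at h
      rcases hu : q0.drop d with _ | ⟨u0, urest⟩
      · exact List.nil_prefix
      · rw [hu] at h
        rw [List.cons_prefix_cons] at h
        have hu1 : q0.drop (d + 1) = urest := pvDrop_succ_of_cons hu
        have h3 : q0.drop (d + 1) <+: t := ih (d + 1) (by rw [hu1]; exact h.2)
        rw [List.cons_prefix_cons]
        refine ⟨h.1, ?_⟩
        rw [← hu1]
        exact h3

-- pvSubst copies a block it cannot match into
theorem pvSubst_append_skip (p n : List Char) :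
    ∀ u x, (∀ d, d < u.length → pvGood (u.drop d) p) →
      pvSubst p n (u ++ x) = u ++ pvSubst p n x := by
  intro u
  induction u with
  | nil => intro x _; simp
  | cons c u' ih =>
    intro x hgood
    have hnp : ¬ p <+: (c :: u') ++ x := by
      intro hpf
      have g := hgood 0 (by simp)
      simp only [List.drop_zero] at g
      exact pvGood_not_prefix_append (pvGood_symm g) hpf
    rw [List.cons_append, pvSubst_neg n (by rw [← List.cons_append]; exact hnp)]
    rw [ih x (fun d hd => by
      have := hgood (d + 1) (by simp; omega)
      rwa [List.drop_succ_cons] at this)]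
    simp

-- pvScan copies a block no table pattern matches into
theorem pvScan_append_skip (T : List (List Char × List Char)) :
    ∀ u x, (∀ pr ∈ T, ∀ d, d < u.length → pvGood (u.drop d) pr.1) →
      pvScan T (u ++ x) = u ++ pvScan T x := by
  intro u
  induction u with
  | nil => intro x _; simp
  | cons c u' ih =>
    intro x hgood
    have hnone : T.find? (fun e => e.1.isPrefixOf ((c :: u') ++ x)) = none := by
      apply pvFind_none
      intro pr hpr hpf
      have g := hgood pr hpr 0 (by simp)
      simp only [List.drop_zero] at g
      exact pvGood_not_prefix_append (pvGood_symm g) hpf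
    rw [List.cons_append, pvScan_cons_none (by rw [← List.cons_append]; exact hnone)]
    rw [ih x (fun pr hpr d hd => by
      have := hgood pr hpr (d + 1) (by simp; omega)
      rwa [List.drop_succ_cons] at this)]
    simp

theorem pvScan_nil_table : ∀ l, pvScan ([] : List (List Char × List Char)) l = l := by
  intro l
  induction l with
  | nil => exact pvScan_nil _
  | cons c t ih => rw [pvScan_cons_none rfl, ih]

-- at most one table pattern matches at a given position
theorem pvUniqMatch {T : List (List Char × List Char)} (hT : ∀ pr ∈ T, pr ∈ pvPL)
    {pr : List Char × List Char} {l : List Char} (hmem : pr ∈ T) (hp : pr.1 <+: l) :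
    ∀ pr' ∈ T, pr'.1 <+: l → pr' = pr := by
  intro pr' hmem' hp'
  by_cases he : pr'.1 = pr.1
  · exact pvKeyInj _ (hT _ hmem') _ (hT _ hmem) he
  · exact absurd hp' (pvGood_not_both_prefix (pvFact_uniq _ (hT _ hmem') _ (hT _ hmem) he) · hp)

-- ---- MAIN exchange lemma: one replace pass before a scan = scan with the pair added ----
theorem pvMain (p n : List Char) (T : List (List Char × List Char))
    (hpn : (p, n) ∈ pvPL) (hT : ∀ pr ∈ T, pr ∈ pvPL) :
    ∀ l, pvScan T (pvSubst p n l) = pvScan ((p, n) :: T) l := by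
  have hp : p ≠ [] := pvFact_nonempty _ hpn
  have hT' : ∀ pr ∈ (p, n) :: T, pr ∈ pvPL := by
    intro pr hpr
    rcases List.mem_cons.mp hpr with rfl | h
    · exact hpn
    · exact hT _ h
  have key : ∀ N, ∀ l : List Char, l.length ≤ N →
      pvScan T (pvSubst p n l) = pvScan ((p, n) :: T) l := by
    intro N
    induction N with
    | zero =>
      intro l hl
      have : l = [] := List.eq_nil_of_length_eq_zero (by omega)
      subst this
      rw [pvSubst_nil, pvScan_nil, pvScan_nil]
    | succ N ih =>
      intro l hl
      by_cases hpf : p <+: l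
      · -- the added pair matches at the head
        have hlne : l ≠ [] := by
          intro he; rw [he, List.prefix_nil] at hpf; exact hp hpf
        rw [pvSubst_pos n hp hpf]
        have hskip : pvScan T (n ++ pvSubst p n (l.drop p.length)) =
            n ++ pvScan T (pvSubst p n (l.drop p.length)) := by
          apply pvScan_append_skip
          intro pr hpr d hd
          rcases Nat.eq_zero_or_pos d with rfl | hdpos
          · simpa using pvFact_rep0 _ hpn _ (hT _ hpr)
          · exact pvFact_tailRep _ hpn _ (hT _ hpr) d hdpos hd
        rw [hskip]
        have hplen : 1 ≤ p.length := by cases p; simp_all; simp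
        have hlen2 : (l.drop p.length).length ≤ N := by
          simp only [List.length_drop]
          have : 1 ≤ l.length := by cases l; simp_all; simp
          omega
        rw [ih _ hlen2]
        have hfind : ((p, n) :: T).find? (fun e => e.1.isPrefixOf l) = some (p, n) :=
          List.find?_cons_of_pos (by rw [List.isPrefixOf_iff_prefix]; exact hpf)
        rw [pvScan_some hp hlne hfind]
      · by_cases hex : ∃ pr ∈ T, pr.1 <+: l
        · -- a pattern of T matches at the head
          obtain ⟨pr, hmem, hpr⟩ := hex
          have hq : pr.1 ≠ [] := pvFact_nonempty _ (hT _ hmem)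
          have hqp : pr.1 ≠ p := by
            intro he; rw [he] at hpr; exact hpf hpr
          obtain ⟨m, rfl⟩ : ∃ m, l = pr.1 ++ m := by
            obtain ⟨m, hm⟩ := hpr; exact ⟨m, hm.symm⟩
          have hgoodqp : ∀ d, d < pr.1.length → pvGood (pr.1.drop d) p := by
            intro d hd
            rcases Nat.eq_zero_or_pos d with rfl | hdpos
            · simpa using pvFact_uniq _ (hT _ hmem) _ hpn hqp
            · exact (pvFact_tailPat _ (hT _ hmem) _ hpn d hdpos hd).1
          rw [pvSubst_append_skip p n _ _ hgoodqp]
          have huniq1 : ∀ pr' ∈ T, pr'.1 <+: pr.1 ++ pvSubst p n m → pr' = pr :=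
            pvUniqMatch hT hmem (List.prefix_append _ _)
          have hfind1 : T.find? (fun e => e.1.isPrefixOf (pr.1 ++ pvSubst p n m)) = some pr :=
            pvFind_some hmem (List.prefix_append _ _) huniq1
          have hne1 : pr.1 ++ pvSubst p n m ≠ [] := by
            cases hc : pr.1 <;> simp_all
          rw [pvScan_some hq hne1 hfind1, List.drop_left]
          have hlen2 : m.length ≤ N := by
            have : 1 ≤ pr.1.length := by cases hc : pr.1 <;> simp_all
            simp only [List.length_append] at hl
            omega
          rw [ih _ hlen2]
          -- right-hand side
          have hfind2 : ((p, n) :: T).find? (fun e => e.1.isPrefixOf (pr.1 ++ m)) = some pr := by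
            rw [List.find?_cons_of_neg (by
              rw [List.isPrefixOf_iff_prefix]
              exact fun hc => pvGood_not_prefix_append
                (pvGood_symm (pvFact_uniq _ (hT _ hmem) _ hpn hqp)) hc)]
            exact pvFind_some hmem (List.prefix_append _ _)
              (pvUniqMatch hT hmem (List.prefix_append _ _))
          have hne2 : pr.1 ++ m ≠ [] := by cases hc : pr.1 <;> simp_all
          rw [pvScan_some hq hne2 hfind2, List.drop_left]
        · -- nothing matches at the head
          push Not at hex
          cases l with
          | nil => rw [pvSubst_nil, pvScan_nil, pvScan_nil]
          | cons c t =>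
            rw [pvSubst_neg n hpf]
            have hnone1 : T.find? (fun e => e.1.isPrefixOf (c :: pvSubst p n t)) = none := by
              apply pvFind_none
              intro pr hpr hc
              apply hex pr hpr
              have hc2 : pr.1 <+: pvSubst p n (c :: t) := by
                rw [pvSubst_neg n hpf]; exact hc
              have := pvSubst_prefix_transfer p n pr.1 hp (fun d hd => by
                rcases Nat.eq_zero_or_pos d with rfl | hdpos
                · simpa using pvGood_symm (pvFact_rep0 _ hpn _ (hT _ hpr))
                · exact (pvFact_tailPat _ (hT _ hpr) _ hpn d hdpos hd).2) (c :: t) 0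
              simpa using this (by simpa using hc2)
            rw [pvScan_cons_none hnone1]
            have hnone2 : ((p, n) :: T).find? (fun e => e.1.isPrefixOf (c :: t)) = none := by
              rw [List.find?_cons_of_neg (by rw [List.isPrefixOf_iff_prefix]; exact hpf)]
              exact pvFind_none hex
            rw [pvScan_cons_none hnone2]
            have hlen2 : t.length ≤ N := by simp at hl; omega
            rw [ih _ hlen2]
  intro l
  exact key l.length l le_rfl

-- A's chain of replaces = B's scan, over any sub-table of pvPL
theorem pvChainMain : ∀ ps, (∀ pr ∈ ps, pr ∈ pvPL) → ∀ l, pvChain ps l = pvScan ps l := by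
  intro ps
  induction ps with
  | nil => intro _ l; rw [pvScan_nil_table]; rfl
  | cons pr rest ih =>
    intro hsub l
    have h1 : pvChain (pr :: rest) l = pvChain rest (pvSubst pr.1 pr.2 l) := rfl
    rw [h1, ih (fun e he => hsub _ (List.mem_cons_of_mem _ he)) (pvSubst pr.1 pr.2 l)]
    exact pvMain pr.1 pr.2 rest (hsub _ List.mem_cons_self)
      (fun e he => hsub _ (List.mem_cons_of_mem _ he)) l

-- the scan is independent of the table order (matches are unique)
theorem pvScanPerm (T1 T2 : List (List Char × List Char))
    (h1 : ∀ pr ∈ T1, pr ∈ pvPL) (_h2 : ∀ pr ∈ T2, pr ∈ pvPL)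
    (h12 : ∀ pr ∈ T1, pr ∈ T2) (h21 : ∀ pr ∈ T2, pr ∈ T1) :
    ∀ l, pvScan T1 l = pvScan T2 l := by
  have key : ∀ N, ∀ l : List Char, l.length ≤ N → pvScan T1 l = pvScan T2 l := by
    intro N
    induction N with
    | zero =>
      intro l hl
      have : l = [] := List.eq_nil_of_length_eq_zero (by omega)
      subst this; rw [pvScan_nil, pvScan_nil]
    | succ N ih =>
      intro l hl
      cases hf : T1.find? (fun e => e.1.isPrefixOf l) with
      | some pr =>
        have hmem := List.mem_of_find?_eq_some hf
        have hpre : pr.1 <+: l := by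
          have := List.find?_some hf
          rwa [List.isPrefixOf_iff_prefix] at this
        have hq : pr.1 ≠ [] := pvFact_nonempty _ (h1 _ hmem)
        have hlne : l ≠ [] := by
          intro he; rw [he, List.prefix_nil] at hpre; exact hq hpre
        have hf2 : T2.find? (fun e => e.1.isPrefixOf l) = some pr :=
          pvFind_some (h12 _ hmem) hpre
            (fun pr' hm' hp' => pvUniqMatch h1 hmem hpre pr' (h21 _ hm') hp')
        rw [pvScan_some hq hlne hf, pvScan_some hq hlne hf2]
        have hlen2 : (l.drop pr.1.length).length ≤ N := by
          simp only [List.length_drop]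
          have : 1 ≤ pr.1.length := by cases hc : pr.1 <;> simp_all
          have : 1 ≤ l.length := by cases hc : l <;> simp_all
          omega
        rw [ih _ hlen2]
      | none =>
        have hnone : ∀ pr ∈ T1, ¬ pr.1 <+: l := by
          intro pr hm
          have := List.find?_eq_none.mp hf pr hm
          rwa [List.isPrefixOf_iff_prefix] at this
        have hf2 : T2.find? (fun e => e.1.isPrefixOf l) = none :=
          pvFind_none (fun pr hm => hnone pr (h21 _ hm))
        cases l with
        | nil => rw [pvScan_nil, pvScan_nil]
        | cons c t =>
          rw [pvScan_cons_none hf, pvScan_cons_none hf2]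
          have : t.length ≤ N := by simp at hl; omega
          rw [ih _ this]
  intro l
  exact key l.length l le_rfl

-- ---- PySem str.replace = pvSubst for a nonempty pattern ----

theorem pvReplace_go_eq (p n : List Char) (hp : p ≠ []) :
    ∀ fuel l acc, l.length ≤ fuel →
      PySem.Chars.replace.go p n fuel l acc = acc.reverse ++ pvSubst p n l := by
  intro fuel
  induction fuel with
  | zero =>
    intro l acc hl
    have : l = [] := List.eq_nil_of_length_eq_zero (by omega)
    subst this
    rw [PySem.Chars.replace.go.eq_def]
    simp [pvSubst_nil]
  | succ fuel ih =>
    intro l acc hl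
    cases l with
    | nil => rw [PySem.Chars.replace.go.eq_def]; simp [pvSubst_nil]
    | cons c t =>
      rw [PySem.Chars.replace.go.eq_def]
      simp only []
      by_cases hpf : p.isPrefixOf (c :: t)
      · rw [if_pos hpf]
        obtain ⟨k, hk⟩ : ∃ k, p.length = k + 1 := ⟨p.length - 1, by cases p <;> simp_all⟩
        have hlen : (List.drop p.length (c :: t)).length ≤ fuel := by
          simp only [List.length_drop, List.length_cons] at *
          omega
        rw [ih _ _ hlen]
        rw [pvSubst, if_pos hpf, hk, List.drop_succ_cons, Nat.add_sub_cancel]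
        simp
      · rw [if_neg hpf]
        have hlen : t.length ≤ fuel := by simp at hl; omega
        rw [ih _ _ hlen]
        rw [pvSubst, if_neg hpf]
        simp

theorem pvReplace_eq (s p n : List Char) (hp : p ≠ []) :
    PySem.Chars.replace s p n = pvSubst p n s := by
  rw [PySem.Chars.replace]
  rw [if_neg (by simp [List.isEmpty_iff]; exact hp)]
  rw [pvReplace_go_eq p n hp s.length s [] le_rfl]
  simp

-- A's fold of Str.replace, pushed down to char lists
theorem pvFoldA : ∀ ps : List (String × String), (∀ pr ∈ ps, pr.1.toList ≠ []) → ∀ b : String,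
    ps.foldl (fun s pr => PySem.Str.replace s pr.1 pr.2) b =
      String.ofList (pvChain (ps.map (fun pr => (pr.1.toList, pr.2.toList))) b.toList) := by
  intro ps
  induction ps with
  | nil => intro _ b; simp [pvChain]
  | cons pr rest ih =>
    intro hne b
    have h1 : (pr :: rest).foldl (fun s pr => PySem.Str.replace s pr.1 pr.2) b =
        rest.foldl (fun s pr => PySem.Str.replace s pr.1 pr.2) (PySem.Str.replace b pr.1 pr.2) := rfl
    rw [h1, ih (fun e he => hne _ (List.mem_cons_of_mem _ he))]
    congr 1
    have h2 : (PySem.Str.replace b pr.1 pr.2).toList =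
        pvSubst pr.1.toList pr.2.toList b.toList := by
      rw [PySem.Str.toList_replace, pvReplace_eq _ _ _ (hne _ List.mem_cons_self)]
    rw [h2]
    rfl

theorem pvPairsA_keys_ne : ∀ pr ∈ pvPairsA, pr.1.toList ≠ [] := by
  intro pr hpr
  have hmem : (pr.1.toList, pr.2.toList) ∈ pvPL := List.mem_map_of_mem hpr
  exact pvFact_nonempty _ hmem

-- the body transformation: A's 20 replaces = B's single scan
theorem pvBody_eq (b : String) :
    pvPairsA.foldl (fun s pr => PySem.Str.replace s pr.1 pr.2) b =
      String.ofList (pvScan pvTableB b.toList) := by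
  rw [pvFoldA pvPairsA pvPairsA_keys_ne b]
  congr 1
  have h1 : pvChain pvPL b.toList = pvScan pvPL b.toList :=
    pvChainMain pvPL (fun _ h => h) b.toList
  have h2 : pvScan pvPL b.toList = pvScan pvTableB b.toList :=
    pvScanPerm pvPL pvTableB (fun _ h => h) pvTB_sub pvPL_sub pvTB_sub b.toList
  exact h1.trans h2

-- ===== VERDICT (by name: the statement is the Claim_ definition above) =====
theorem update_body_links_spec : Claim_equal_update_body_links := by
  intro html _
  unfold Spec_update_body_links update_body_links update_body_links_alt
  simp only []
  rw [pvBody_eq]
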